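-- pv_equiv track=rewrite | github.com/doctorMcbob/wesleyscoolsite | LURD.py | findsub
-- ===== SOURCE A (Python) =====
-- def getsub(b, pos, dim): return [b[pos[1]+y][pos[0]:pos[0]+dim[0]] for y in range(dim[1])]
--
-- def allof(b, piece):
--     for y, line in enumerate(b):
--         for x, pce in enumerate(line):
--             if pce == piece: yield x, y
--
-- def bisequal(b1, b2):
--     if len(b1) != len(b2):return False
--     for i in range(len(b1)):
--         if b1[i] != b2[i]: return False
--     return True
--
-- def findsub(b, sub):
--     checklist = allof(b, sub[0][0])
--     ret = []
--     for pos in checklist: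
--         try:
--             if bisequal(getsub(b, pos, (len(sub[0]), len(sub))), sub):
--                 ret.append(pos)
--         except IndexError: continue
--     return ret
-- ===== SOURCE B (Python) =====
-- def findsub(b, sub):
--     h = len(sub)
--     w = len(sub[0])
--     return [(x, y)
--             for y in range(len(b) - h + 1)
--             for x in range(len(b[y]))
--             if all(b[y + i][x:x + w] == sub[i] for i in range(h))]
-- ===== Notes on version B (the rewrite author's own statement) =====
-- stated objective: simpler
-- what changed: Replaces A's generator of first-cell candidates plus subgrid extraction (getsub with try/except IndexError) and element-wise list comparison (bisequal) by one nested comprehension over the valid top rows that compares row slices directly; the candidate filter, the extraction helper and the exception handling disappear.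
import Mathlib
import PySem

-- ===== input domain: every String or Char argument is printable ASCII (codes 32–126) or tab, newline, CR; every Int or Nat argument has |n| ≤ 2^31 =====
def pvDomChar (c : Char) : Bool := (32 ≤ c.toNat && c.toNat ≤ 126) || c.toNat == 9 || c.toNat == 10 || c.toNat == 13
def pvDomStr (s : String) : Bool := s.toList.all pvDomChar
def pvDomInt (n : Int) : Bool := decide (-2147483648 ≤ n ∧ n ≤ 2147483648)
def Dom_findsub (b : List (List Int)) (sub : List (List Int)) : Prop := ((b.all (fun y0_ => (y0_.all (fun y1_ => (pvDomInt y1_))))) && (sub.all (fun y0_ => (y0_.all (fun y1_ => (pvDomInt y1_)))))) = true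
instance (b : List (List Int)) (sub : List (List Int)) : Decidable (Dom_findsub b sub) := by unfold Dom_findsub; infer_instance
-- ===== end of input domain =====

-- B replaces A's candidate generator + getsub/bisequal helpers + try/except by one nested
-- comprehension over the valid top rows comparing row slices directly (objective: simpler).

-- ===== PORT A =====
def allofA (b : List (List Int)) (piece : Int) : List (Int × Int) :=
  (PySem.List.enumerate b).flatMap (fun yl =>
    (PySem.List.enumerate yl.2).filterMap (fun xp =>
      if xp.2 == piece then some (xp.1, yl.1) else none))

def getsubA (b : List (List Int)) (pos : Int × Int) (dim : Int × Int) : Option (List (List Int)) :=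
  (PySem.List.pyRange 0 dim.2 1).mapM (fun y =>
    (PySem.List.pyGet? b (pos.2 + y)).map (fun row =>
      PySem.List.slice row (some pos.1) (some (pos.1 + dim.1))))

def bisequalA (b1 b2 : List (List Int)) : Bool :=
  if b1.length != b2.length then false
  else (List.range b1.length).all (fun i => b1[i]? == b2[i]?)

def findsub (b : List (List Int)) (sub : List (List Int)) : List (Int × Int) :=
  (allofA b ((sub.headD []).headD 0)).foldl (fun ret pos =>
    match getsubA b pos (((sub.headD []).length : Int), (sub.length : Int)) with
    | none => ret
    | some g => if bisequalA g sub then ret ++ [pos] else ret) []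

-- ===== PORT B =====
def findsub_alt (b : List (List Int)) (sub : List (List Int)) : List (Int × Int) :=
  let h : Int := sub.length
  let w : Int := (sub.headD []).length
  (PySem.List.pyRange 0 ((b.length : Int) - h + 1) 1).flatMap (fun y =>
    (PySem.List.pyRange 0 ((PySem.List.pyGetD b y []).length : Int) 1).filterMap (fun x =>
      if (PySem.List.pyRange 0 h 1).all (fun i =>
           PySem.List.slice (PySem.List.pyGetD b (y + i) []) (some x) (some (x + w))
             == PySem.List.pyGetD sub i [])
      then some (x, y) else none))

-- ===== PRECONDITION & SPEC =====
-- Pre_ excludes exactly the inputs where A raises IndexError on sub[0][0]: empty sub or empty first row.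
def Pre_findsub (b : List (List Int)) (sub : List (List Int)) : Prop :=
  sub ≠ [] ∧ sub.headD [] ≠ []
instance (b : List (List Int)) (sub : List (List Int)) : Decidable (Pre_findsub b sub) := by
  unfold Pre_findsub; infer_instance
def pvWitness_findsub : List (List Int) × List (List Int) := ([[1, 2], [3, 1]], [[1]])

def Spec_findsub (b : List (List Int)) (sub : List (List Int)) (out : List (Int × Int)) : Prop := out = findsub_alt b sub
instance (b : List (List Int)) (sub : List (List Int)) (out : List (Int × Int)) : Decidable (Spec_findsub b sub out) := by unfold Spec_findsub; infer_instance

-- ===== CLAIM (what is proved, stated in full; the proofs are below) =====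
def Claim_equal_findsub : Prop := ∀ (b : List (List Int)) (sub : List (List Int)), Dom_findsub b sub → Pre_findsub b sub → Spec_findsub b sub (findsub b sub)


-- ===== LEMMAS AND PROOFS =====

-- canonical middle form both ports are reduced to
def pvCond (b sub : List (List Int)) (yn xn : Nat) : Bool :=
  (List.range sub.length).all
    (fun i => ((b.getD (yn + i) []).drop xn).take (sub.headD []).length == sub.getD i [])

def pvCanon (b sub : List (List Int)) : List (Int × Int) :=
  (List.range (b.length + 1 - sub.length)).flatMap (fun yn =>
    (List.range (b.getD yn []).length).filterMap (fun xn =>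
      if pvCond b sub yn xn then some ((xn : Int), (yn : Int)) else none))

theorem pv_enum_filterMap {α β : Type} (xs : List α) (d : α) (f : Int → α → Option β) :
    ∀ s : Int, (PySem.List.enumerate xs s).filterMap (fun p => f p.1 p.2)
      = (List.range xs.length).filterMap (fun (k : Nat) => f (s + (k : Int)) (xs.getD k d)) := by
  induction xs with
  | nil => intro s; simp [PySem.List.enumerate_nil]
  | cons x xs ih =>
    intro s
    rw [PySem.List.enumerate_cons, List.filterMap_cons, ih (s + 1),
        List.length_cons, List.range_succ_eq_map, List.filterMap_cons, List.filterMap_map]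
    simp [add_comm, add_left_comm]

theorem pv_enum_flatMap {α β : Type} (xs : List α) (d : α) (f : Int → α → List β) :
    ∀ s : Int, (PySem.List.enumerate xs s).flatMap (fun p => f p.1 p.2)
      = (List.range xs.length).flatMap (fun (k : Nat) => f (s + (k : Int)) (xs.getD k d)) := by
  induction xs with
  | nil => intro s; simp [PySem.List.enumerate_nil]
  | cons x xs ih =>
    intro s
    rw [PySem.List.enumerate_cons, List.flatMap_cons, ih (s + 1),
        List.length_cons, List.range_succ_eq_map, List.flatMap_cons, List.flatMap_map]
    simp [add_comm, add_left_comm]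

theorem pv_filter_flatMap {α β : Type} (l : List α) (g : α → List β) (q : β → Bool) :
    (l.flatMap g).filter q = l.flatMap (fun a => (g a).filter q) := by
  induction l with
  | nil => simp
  | cons x xs ih => simp [List.flatMap_cons, List.filter_append, ih]

theorem pv_filter_filterMap_if {α β : Type} (l : List α) (c : α → Bool) (v : α → β) (q : β → Bool) :
    ((l.filterMap (fun a => if c a then some (v a) else none)).filter q)
      = l.filterMap (fun a => if c a && q (v a) then some (v a) else none) := by
  induction l with
  | nil => simp
  | cons x xs ih =>
    by_cases hc : c x
    · by_cases hq : q (v x) <;> simp [hc, hq, ih]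
    · simp [hc, ih]

theorem pv_mapM_some {α β : Type} (l : List α) (f : α → Option β) (g : α → β)
    (h : ∀ a ∈ l, f a = some (g a)) : l.mapM f = some (l.map g) := by
  induction l with
  | nil => simp
  | cons x xs ih =>
    have hx := h x (List.mem_cons_self ..)
    have ihs := ih (fun a ha => h a (List.mem_cons_of_mem _ ha))
    simp [List.mapM_cons, hx, ihs]

theorem pv_mapM_none {α β : Type} (l : List α) (f : α → Option β) (a : α)
    (ha : a ∈ l) (h : f a = none) : l.mapM f = none := by
  induction l with
  | nil => simp at ha
  | cons x xs ih =>
    rcases List.mem_cons.mp ha with rfl | ha'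
    · simp [List.mapM_cons, h]
    · cases hfx : f x
      · simp [List.mapM_cons, hfx]
      · simp [List.mapM_cons, hfx, ih ha']

theorem pv_flatMap_range_prefix {β : Type} (f : Nat → List β) (m n : Nat) (hmn : m ≤ n)
    (h : ∀ k, m ≤ k → k < n → f k = []) :
    (List.range n).flatMap f = (List.range m).flatMap f := by
  have hn : n = m + (n - m) := by omega
  rw [hn, List.range_add, List.flatMap_append]
  have hz : ((List.range (n - m)).map (m + ·)).flatMap f = [] := by
    simp only [List.flatMap_eq_nil_iff, List.mem_map, List.mem_range]
    rintro _ ⟨k, hk, rfl⟩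
    exact h _ (by omega) (by omega)
  rw [hz, List.append_nil]

-- B = canonical
theorem pv_alt_eq_canon (b sub : List (List Int)) : findsub_alt b sub = pvCanon b sub := by
  simp only [findsub_alt, pvCanon]
  have h1 : (((b.length : Int) - (sub.length : Int) + 1) - 0).toNat = b.length + 1 - sub.length := by
    omega
  rw [PySem.List.pyRange_one 0 ((b.length : Int) - (sub.length : Int) + 1), h1, List.flatMap_map]
  apply List.flatMap_congr
  intro yn _
  simp only [zero_add, PySem.List.pyGetD_natCast]
  have h2 : ((((b.getD yn []).length : Int)) - 0).toNat = (b.getD yn []).length := by omega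
  rw [PySem.List.pyRange_one 0 ((b.getD yn []).length : Int), h2, List.filterMap_map]
  apply List.filterMap_congr
  intro xn _
  simp only [Function.comp_def, zero_add]
  have h3 : (((sub.length : Int)) - 0).toNat = sub.length := by omega
  rw [PySem.List.pyRange_one 0 (sub.length : Int), h3, List.all_map]
  simp only [Function.comp_def, zero_add, pvCond]
  have hcond : ((List.range sub.length).all fun (k : Nat) =>
      PySem.List.slice (PySem.List.pyGetD b ((yn : Int) + (k : Int)) []) (some (xn : Int))
          (some ((xn : Int) + ((sub.headD []).length : Int)))
        == PySem.List.pyGetD sub (k : Int) [])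
      = ((List.range sub.length).all fun i =>
          ((b.getD (yn + i) []).drop xn).take (sub.headD []).length == sub.getD i []) := by
    apply List.all_congr rfl
    intro i
    have hyi : (yn : Int) + (i : Int) = ((yn + i : Nat) : Int) := by push_cast; ring
    rw [hyi, PySem.List.pyGetD_natCast, PySem.List.pyGetD_natCast,
        PySem.List.slice_natCast_add]
  rw [hcond]
  rfl

-- getsub evaluates when the band fits
theorem pv_getsub_some (b sub : List (List Int)) (yn xn : Nat)
    (hy : yn + sub.length ≤ b.length) :
    getsubA b ((xn : Int), (yn : Int)) (((sub.headD []).length : Int), (sub.length : Int))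
      = some ((List.range sub.length).map
          (fun i => ((b.getD (yn + i) []).drop xn).take (sub.headD []).length)) := by
  unfold getsubA
  have h3 : (((sub.length : Int)) - 0).toNat = sub.length := by omega
  rw [PySem.List.pyRange_one 0 (sub.length : Int), h3]
  rw [pv_mapM_some _ _ (fun y => ((b.getD (yn + y.toNat) []).drop xn).take (sub.headD []).length)]
  · congr 1
    rw [List.map_map]
    apply List.map_congr_left
    intro i _
    simp
  · intro a ha
    rcases List.mem_map.mp ha with ⟨i, hi, rfl⟩
    rw [List.mem_range] at hi
    simp only [zero_add]
    have hyi : (yn : Int) + (i : Int) = ((yn + i : Nat) : Int) := by push_cast; ring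
    rw [hyi, PySem.List.pyGet?_natCast]
    rw [List.getElem?_eq_getElem (by omega)]
    simp only [Option.map_some]
    rw [PySem.List.slice_natCast_add]
    have htn : ((i : Int)).toNat = i := by omega
    rw [htn]
    have hbg : b.getD (yn + i) [] = b[yn + i]'(by omega) := List.getD_eq_getElem _ _ (by omega)
    rw [hbg]

-- getsub raises when the band does not fit
theorem pv_getsub_none (b sub : List (List Int)) (yn : Nat) (x : Int)
    (hs : sub ≠ []) (hy : b.length < yn + sub.length) :
    getsubA b (x, (yn : Int)) (((sub.headD []).length : Int), (sub.length : Int)) = none := by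
  unfold getsubA
  have h3 : (((sub.length : Int)) - 0).toNat = sub.length := by omega
  rw [PySem.List.pyRange_one 0 (sub.length : Int), h3]
  have hlen : 0 < sub.length := List.length_pos_iff.mpr hs
  apply pv_mapM_none _ _ ((sub.length - 1 : Nat) : Int)
  · exact List.mem_map.mpr ⟨sub.length - 1, List.mem_range.mpr (by omega), by simp⟩
  · have hyi : (yn : Int) + ((sub.length - 1 : Nat) : Int) = ((yn + (sub.length - 1) : Nat) : Int) := by
      push_cast; ring
    simp only [zero_add]
    rw [hyi, PySem.List.pyGet?_natCast, List.getElem?_eq_none (by omega)]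
    simp

-- bisequal on the extracted band is exactly pvCond
theorem pv_bisequal_eval (b sub : List (List Int)) (yn xn : Nat) :
    bisequalA ((List.range sub.length).map
        (fun i => ((b.getD (yn + i) []).drop xn).take (sub.headD []).length)) sub
      = pvCond b sub yn xn := by
  unfold bisequalA pvCond
  rw [if_neg (by simp)]
  simp only [List.length_map, List.length_range]
  apply Bool.eq_iff_iff.mpr
  simp only [List.all_eq_true, List.mem_range]
  constructor
  · intro h i hi
    have hh := h i hi
    rw [List.getElem?_map, List.getElem?_range hi,
        List.getElem?_eq_getElem hi] at hh
    simp only [Option.map_some, beq_iff_eq, Option.some.injEq] at hh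
    rw [beq_iff_eq, hh, List.getD_eq_getElem?_getD, List.getElem?_eq_getElem hi]
    simp
  · intro h i hi
    have hh := h i hi
    rw [beq_iff_eq] at hh
    rw [List.getElem?_map, List.getElem?_range hi, List.getElem?_eq_getElem hi]
    simp only [Option.map_some, beq_iff_eq, Option.some.injEq]
    rw [hh, List.getD_eq_getElem?_getD, List.getElem?_eq_getElem hi]
    simp

-- a full match forces the first-cell test
theorem pv_cond_first (b sub : List (List Int)) (yn xn : Nat)
    (hs : sub ≠ []) (hs0 : sub.headD [] ≠ [])
    (hx : xn < (b.getD yn []).length) (hc : pvCond b sub yn xn = true) :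
    ((b.getD yn []).getD xn 0 == (sub.headD []).headD 0) = true := by
  cases sub with
  | nil => exact absurd rfl hs
  | cons s0 rest =>
    cases s0 with
    | nil => simp at hs0
    | cons c cs =>
      unfold pvCond at hc
      rw [List.all_eq_true] at hc
      have h0 := hc 0 (List.mem_range.mpr (by simp))
      simp only [Nat.add_zero, List.headD_cons, List.getD_cons_zero, beq_iff_eq] at h0
      rw [List.drop_eq_getElem_cons hx] at h0
      simp only [List.length_cons, List.take_succ_cons, List.cons.injEq] at h0
      rw [List.getD_eq_getElem _ _ hx]
      simp only [List.headD_cons, beq_iff_eq]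
      exact h0.1

theorem pv_a_eq_canon (b sub : List (List Int)) (hs : sub ≠ []) (hs0 : sub.headD [] ≠ []) :
    findsub b sub = pvCanon b sub := by
  set piece := (sub.headD []).headD 0 with hpiece
  set Qb : Int × Int → Bool := fun pos =>
    match getsubA b pos (((sub.headD []).length : Int), (sub.length : Int)) with
    | none => false
    | some g => bisequalA g sub with hQb
  have hstep : findsub b sub = (allofA b piece).filter Qb := by
    unfold findsub
    have hbody : (fun (ret : List (Int × Int)) pos =>
        match getsubA b pos (((sub.headD []).length : Int), (sub.length : Int)) with
        | none => ret
        | some g => if bisequalA g sub then ret ++ [pos] else ret)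
        = fun ret pos => if Qb pos then ret ++ [pos] else ret := by
      funext ret pos
      cases h : getsubA b pos (((sub.headD []).length : Int), (sub.length : Int)) with
      | none => simp only [hQb, h]; simp
      | some g => simp only [hQb, h]
    rw [hbody, PySem.List.foldl_append_if_eq_filter, List.nil_append]
  have hall : allofA b piece = (List.range b.length).flatMap (fun yn =>
      (List.range (b.getD yn []).length).filterMap (fun xn =>
        if (b.getD yn []).getD xn 0 == piece then some ((xn : Int), (yn : Int)) else none)) := by
    unfold allofA
    rw [pv_enum_flatMap b ([] : List Int) (fun y row =>
      (PySem.List.enumerate row).filterMap (fun xp =>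
        if xp.2 == piece then some (xp.1, y) else none)) 0]
    apply List.flatMap_congr
    intro yn _
    rw [pv_enum_filterMap (b.getD yn []) 0 (fun x v =>
      if v == piece then some (x, 0 + (yn : Int)) else none) 0]
    simp
  rw [hstep, hall, pv_filter_flatMap]
  have h1 : (List.range b.length).flatMap (fun yn =>
        ((List.range (b.getD yn []).length).filterMap (fun xn =>
          if (b.getD yn []).getD xn 0 == piece then some ((xn : Int), (yn : Int)) else none)).filter Qb)
      = (List.range b.length).flatMap (fun yn =>
        (List.range (b.getD yn []).length).filterMap (fun xn =>
          if ((b.getD yn []).getD xn 0 == piece) && Qb ((xn : Int), (yn : Int))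
          then some ((xn : Int), (yn : Int)) else none)) := by
    apply List.flatMap_congr
    intro yn _
    exact pv_filter_filterMap_if _ _ _ _
  rw [h1]
  have hlen : 0 < sub.length := List.length_pos_iff.mpr hs
  rw [pv_flatMap_range_prefix _ (b.length + 1 - sub.length) b.length (by omega)]
  · unfold pvCanon
    apply List.flatMap_congr
    intro yn hyn
    rw [List.mem_range] at hyn
    apply List.filterMap_congr
    intro xn hxn
    rw [List.mem_range] at hxn
    have hfit : yn + sub.length ≤ b.length := by omega
    have hQ : Qb ((xn : Int), (yn : Int)) = pvCond b sub yn xn := by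
      simp only [hQb, pv_getsub_some b sub yn xn hfit, pv_bisequal_eval]
    rw [hQ]
    cases hc : pvCond b sub yn xn
    · simp
    · rw [pv_cond_first b sub yn xn hs hs0 hxn hc]
      simp
  · intro yn hy1 hy2
    rw [List.filterMap_eq_nil_iff]
    intro xn _
    have hQ : Qb ((xn : Int), (yn : Int)) = false := by
      simp only [hQb, pv_getsub_none b sub yn ((xn : Int)) hs (by omega)]
    rw [hQ, Bool.and_false, if_neg (by simp)]

theorem findsub_main : ∀ (b sub : List (List Int)), Pre_findsub b sub → findsub b sub = findsub_alt b sub := by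
  intro b sub hpre
  rw [pv_a_eq_canon b sub hpre.1 hpre.2, pv_alt_eq_canon]

-- ===== VERDICT (by name: the statement is the Claim_ definition above) =====
theorem findsub_spec : Claim_equal_findsub := by
  intro b sub _ hpre
  exact findsub_main b sub hpre
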